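-- pv_equiv track=rewrite | github.com/nezapajek/project-tobamo | analysis/references/get_genus_representatives.py | calculate_alignment_length
-- ===== SOURCE A (Python) =====
-- def calculate_alignment_length(seq_a: str, seq_b: str) -> tuple[int, int]:
--     match_positions = [index for index, (a, b) in enumerate(zip(seq_a, seq_b)) if a != "-" and b != "-"]
--     if not match_positions:
--         return 0, 0
--
--     first_match = match_positions[0]
--     last_match = match_positions[-1] + 1
--     aln_len = last_match - first_match
--     aln_orf_len = aln_len - sum(1 for value in seq_a[first_match:last_match] if value == "-")
--     return aln_len, aln_orf_len
-- ===== SOURCE B (Python) =====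
-- def calculate_alignment_length(seq_a: str, seq_b: str) -> tuple[int, int]:
--     n = min(len(seq_a), len(seq_b))
--     i = 0
--     while i < n and (seq_a[i] == "-" or seq_b[i] == "-"):
--         i += 1
--     if i == n:
--         return 0, 0
--     j = n
--     while seq_a[j - 1] == "-" or seq_b[j - 1] == "-":
--         j -= 1
--     aln_len = j - i
--     return aln_len, aln_len - seq_a[i:j].count("-")
-- ===== Notes on version B (the rewrite author's own statement) =====
-- stated objective: faster
-- what changed: Instead of materialising the list of all match positions over the zipped strings, B scans inward from both ends for the first and last double-non-gap column and counts gaps in the slice between them, so the full-length Python-level pass disappears.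
import Mathlib
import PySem

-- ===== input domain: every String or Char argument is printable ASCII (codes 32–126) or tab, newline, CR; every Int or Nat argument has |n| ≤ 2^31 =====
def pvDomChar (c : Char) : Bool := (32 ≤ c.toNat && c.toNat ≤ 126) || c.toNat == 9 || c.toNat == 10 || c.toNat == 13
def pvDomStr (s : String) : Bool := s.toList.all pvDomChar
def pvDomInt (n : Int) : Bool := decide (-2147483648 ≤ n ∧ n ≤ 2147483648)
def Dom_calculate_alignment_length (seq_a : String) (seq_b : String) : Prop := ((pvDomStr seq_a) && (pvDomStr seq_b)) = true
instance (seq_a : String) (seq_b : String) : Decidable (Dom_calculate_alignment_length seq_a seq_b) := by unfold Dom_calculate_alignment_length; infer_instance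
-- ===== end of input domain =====

-- B replaces A's materialised list of all match positions by two boundary scans and a slice count; measurably faster (constant factor).

-- ===== PORT A =====
-- the list comprehension over enumerate(zip(seq_a, seq_b)): collects every index where both chars are non-gap
def pvMatchPos : Nat → List (Char × Char) → List Nat
  | _, [] => []
  | i, p :: rest => if p.1 ≠ '-' ∧ p.2 ≠ '-' then i :: pvMatchPos (i + 1) rest else pvMatchPos (i + 1) rest

def calculate_alignment_length (seq_a : String) (seq_b : String) : Int × Int :=
  let mp : List Nat := pvMatchPos 0 (seq_a.toList.zip seq_b.toList)
  if mp = [] then (0, 0)  -- if not match_positions: return 0, 0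
  else
    let first := mp.headD 0        -- match_positions[0]  (mp is nonempty here)
    let last := mp.getLastD 0 + 1  -- match_positions[-1] + 1
    let alnLen : Int := (last : Int) - (first : Int)
    -- sum(1 for value in seq_a[first:last] if value == "-")
    let gaps : Int := ((PySem.List.slice seq_a.toList (some (first : Int)) (some (last : Int))).filter (fun c => c == '-')).length
    (alnLen, alnLen - gaps)

-- ===== PORT B =====
-- forward scan: first index i in [start, n) where both chars are non-gap, else n
def pvFirst (la lb : List Char) (n : Nat) (i : Nat) : Nat :=
  if h : i < n then
    if la.getD i ' ' = '-' ∨ lb.getD i ' ' = '-' then pvFirst la lb n (i + 1) else i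
  else i
termination_by n - i

-- backward scan: peel trailing double-gap columns off j (the j = 0 case only makes the recursion total; B's loop stops earlier)
def pvLast (la lb : List Char) : Nat → Nat
  | 0 => 0
  | j + 1 => if la.getD j ' ' = '-' ∨ lb.getD j ' ' = '-' then pvLast la lb j else j + 1

def calculate_alignment_length_alt (seq_a : String) (seq_b : String) : Int × Int :=
  let la := seq_a.toList
  let lb := seq_b.toList
  let n := min la.length lb.length
  let i := pvFirst la lb n 0
  if i = n then (0, 0)
  else
    let j := pvLast la lb n
    let alnLen : Int := (j : Int) - (i : Int)
    (alnLen, alnLen - ((PySem.List.slice la (some (i : Int)) (some (j : Int))).count '-'))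

-- ===== PRECONDITION & SPEC =====
def Spec_calculate_alignment_length (seq_a : String) (seq_b : String) (out : Int × Int) : Prop := out = calculate_alignment_length_alt seq_a seq_b
instance (seq_a : String) (seq_b : String) (out : Int × Int) : Decidable (Spec_calculate_alignment_length seq_a seq_b out) := by unfold Spec_calculate_alignment_length; infer_instance

-- ===== CLAIM (what is proved, stated in full; the proofs are below) =====
def Claim_equal_calculate_alignment_length : Prop := ∀ (seq_a : String) (seq_b : String), Dom_calculate_alignment_length seq_a seq_b → Spec_calculate_alignment_length seq_a seq_b (calculate_alignment_length seq_a seq_b)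

-- ===== LEMMAS AND PROOFS =====

-- the gap test on a zipped column
def pvGapB (p : Char × Char) : Bool := p.1 = '-' || p.2 = '-'

theorem pvMatchPos_head (z : List (Char × Char)) (i : Nat) :
    (pvMatchPos i z).head? =
      if (z.takeWhile pvGapB).length = z.length then none
      else some (i + (z.takeWhile pvGapB).length) := by
  induction z generalizing i with
  | nil => simp [pvMatchPos]
  | cons p rest ih =>
    by_cases h : p.1 ≠ '-' ∧ p.2 ≠ '-'
    · have hg : pvGapB p = false := by simp only [pvGapB]; simp; tauto
      simp [pvMatchPos, h, hg]
    · have hg : pvGapB p = true := by simp only [pvGapB]; simp; tauto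
      have hle : (rest.takeWhile pvGapB).length ≤ rest.length := by
        simpa using List.IsPrefix.length_le (List.takeWhile_prefix pvGapB)
      simp [pvMatchPos, h, hg, ih]
      by_cases he : (rest.takeWhile pvGapB).length = rest.length
      · simp [he]
      · simp [he]
        omega

theorem pvLen_takeWhile (p : α → Bool) (w : List α) :
    (w.takeWhile p).length ≤ w.length := by
  simpa using List.IsPrefix.length_le (List.takeWhile_prefix p)

theorem pvLen_takeWhile_eq_iff (p : α → Bool) (w : List α) :
    (w.takeWhile p).length = w.length ↔ ∀ a ∈ w, p a := by
  constructor
  · intro h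
    have := (List.takeWhile_prefix p (l := w)).eq_of_length h
    intro a ha
    exact List.takeWhile_eq_self_iff.mp this a ha
  · intro h
    rw [List.takeWhile_eq_self_iff.mpr h]

theorem pvMatchPos_append (i : Nat) (xs ys : List (Char × Char)) :
    pvMatchPos i (xs ++ ys) = pvMatchPos i xs ++ pvMatchPos (i + xs.length) ys := by
  induction xs generalizing i with
  | nil => simp [pvMatchPos]
  | cons p rest ih =>
    have harith : i + 1 + rest.length = i + (rest.length + 1) := by omega
    by_cases h : p.1 ≠ '-' ∧ p.2 ≠ '-' <;>
      simp [pvMatchPos, h, ih, harith]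

theorem pvMatchPos_getLast (z : List (Char × Char)) (i : Nat) :
    (pvMatchPos i z).getLast? =
      if (z.reverse.takeWhile pvGapB).length = z.length then none
      else some (i + (z.length - 1 - (z.reverse.takeWhile pvGapB).length)) := by
  induction z using List.reverseRecOn generalizing i with
  | nil => simp [pvMatchPos]
  | append_singleton w p ih =>
    rw [pvMatchPos_append]
    by_cases h : p.1 ≠ '-' ∧ p.2 ≠ '-'
    · have hg : pvGapB p = false := by simp only [pvGapB]; simp; tauto
      simp [pvMatchPos, h, hg]
    · have hg : pvGapB p = true := by simp only [pvGapB]; simp; tauto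
      have hle : (w.reverse.takeWhile pvGapB).length ≤ w.length := by
        simpa using pvLen_takeWhile pvGapB w.reverse
      simp [pvMatchPos, h, hg, ih]
      by_cases he : (w.reverse.takeWhile pvGapB).length = w.length
      · simp [he]
      · simp [he]
        omega

theorem pvFirst_spec (la lb : List Char) (k i : Nat) (hk : i + k = (la.zip lb).length) :
    pvFirst la lb (la.zip lb).length i =
      i + (((la.zip lb).drop i).takeWhile pvGapB).length := by
  induction k generalizing i with
  | zero =>
    rw [pvFirst, dif_neg (by omega), List.drop_eq_nil_of_le (by omega)]
    simp
  | succ k ih =>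
    have hlen : (la.zip lb).length = min la.length lb.length := List.length_zip ..
    have hi : i < (la.zip lb).length := by omega
    have hia : i < la.length := by omega
    have hib : i < lb.length := by omega
    have hda : la.getD i ' ' = la[i] := by
      rw [List.getD_eq_getElem?_getD, List.getElem?_eq_getElem hia]; rfl
    have hdb : lb.getD i ' ' = lb[i] := by
      rw [List.getD_eq_getElem?_getD, List.getElem?_eq_getElem hib]; rfl
    have hdrop : (la.zip lb).drop i = (la[i], lb[i]) :: (la.zip lb).drop (i + 1) := by
      rw [List.drop_eq_getElem_cons hi, List.getElem_zip]
    rw [pvFirst, dif_pos hi, hdrop]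
    by_cases h : la[i] = '-' ∨ lb[i] = '-'
    · have hg : pvGapB (la[i], lb[i]) = true := by simp [pvGapB]; tauto
      rw [if_pos (by rw [hda, hdb]; exact h), ih (i + 1) (by omega)]
      simp [hg]
      omega
    · have hg : pvGapB (la[i], lb[i]) = false := by
        push Not at h
        simp [pvGapB]
        tauto
      rw [if_neg (by rw [hda, hdb]; exact h), List.takeWhile_cons, hg]
      simp

theorem pvLast_spec (la lb : List Char) (j : Nat) (hj : j ≤ (la.zip lb).length) :
    pvLast la lb j = j - ((((la.zip lb).take j).reverse).takeWhile pvGapB).length := by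
  induction j with
  | zero => simp [pvLast]
  | succ j ih =>
    have hlen : (la.zip lb).length = min la.length lb.length := List.length_zip ..
    have hj' : j < (la.zip lb).length := by omega
    have hja : j < la.length := by omega
    have hjb : j < lb.length := by omega
    have hda : la.getD j ' ' = la[j] := by
      rw [List.getD_eq_getElem?_getD, List.getElem?_eq_getElem hja]; rfl
    have hdb : lb.getD j ' ' = lb[j] := by
      rw [List.getD_eq_getElem?_getD, List.getElem?_eq_getElem hjb]; rfl
    have htake : (la.zip lb).take (j + 1) = (la.zip lb).take j ++ [(la[j], lb[j])] := by
      rw [List.take_add_one, List.getElem?_eq_getElem hj', List.getElem_zip]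
      rfl
    have hle : (((la.zip lb).take j).reverse.takeWhile pvGapB).length ≤ j := by
      have h1 := pvLen_takeWhile pvGapB ((la.zip lb).take j).reverse
      simp at h1
      omega
    rw [pvLast]
    by_cases h : la[j] = '-' ∨ lb[j] = '-'
    · have hg : pvGapB (la[j], lb[j]) = true := by simp [pvGapB]; tauto
      rw [if_pos (by rw [hda, hdb]; exact h), ih (by omega), htake]
      rw [List.reverse_append]
      simp [hg]
    · have hg : pvGapB (la[j], lb[j]) = false := by
        push Not at h
        simp [pvGapB]
        tauto
      rw [if_neg (by rw [hda, hdb]; exact h), htake]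
      rw [List.reverse_append]
      simp [hg]

-- ===== VERDICT (by name: the statement is the Claim_ definition above) =====
theorem calculate_alignment_length_spec : Claim_equal_calculate_alignment_length := by
  intro sa sb _
  show calculate_alignment_length sa sb = calculate_alignment_length_alt sa sb
  simp only [calculate_alignment_length, calculate_alignment_length_alt]
  set la := sa.toList with hla
  set lb := sb.toList with hlb
  have hlen : (la.zip lb).length = min la.length lb.length := List.length_zip ..
  have htwle : ((la.zip lb).takeWhile pvGapB).length ≤ (la.zip lb).length :=
    pvLen_takeWhile ..
  have htwrle : (((la.zip lb).reverse).takeWhile pvGapB).length ≤ (la.zip lb).length := by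
    simpa using pvLen_takeWhile pvGapB (la.zip lb).reverse
  have hfirst : pvFirst la lb (min la.length lb.length) 0 = ((la.zip lb).takeWhile pvGapB).length := by
    rw [← hlen]
    simpa using pvFirst_spec la lb (la.zip lb).length 0 (by omega)
  have hlast : pvLast la lb (min la.length lb.length) = (la.zip lb).length - ((la.zip lb).reverse.takeWhile pvGapB).length := by
    rw [← hlen, pvLast_spec la lb _ le_rfl, List.take_length]
  have hiff : (((la.zip lb).takeWhile pvGapB).length = (la.zip lb).length) ↔ (((la.zip lb).reverse.takeWhile pvGapB).length = (la.zip lb).length) := by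
    have e1 := pvLen_takeWhile_eq_iff pvGapB (la.zip lb)
    have e2 := pvLen_takeWhile_eq_iff pvGapB (la.zip lb).reverse
    simp only [List.length_reverse, List.mem_reverse] at e2
    rw [e1, e2]
  have hmpnil : (pvMatchPos 0 (la.zip lb) = []) ↔ ((la.zip lb).takeWhile pvGapB).length = (la.zip lb).length := by
    rw [← List.head?_eq_none_iff, pvMatchPos_head]
    split_ifs with h
    · simp [h]
    · simp only [false_iff]
      exact h
  by_cases hall : ((la.zip lb).takeWhile pvGapB).length = (la.zip lb).length
  · rw [if_pos (hmpnil.mpr hall), if_pos (by rw [hfirst, hall, hlen])]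
  · have hallr : ((la.zip lb).reverse.takeWhile pvGapB).length ≠ (la.zip lb).length :=
      fun h => hall (hiff.mpr h)
    rw [if_neg (fun h => hall (hmpnil.mp h)),
        if_neg (by rw [hfirst, ← hlen]; exact hall)]
    have hh : (pvMatchPos 0 (la.zip lb)).headD 0 = ((la.zip lb).takeWhile pvGapB).length := by
      rw [List.headD_eq_head?_getD, pvMatchPos_head, if_neg hall]
      simp
    have hl : (pvMatchPos 0 (la.zip lb)).getLastD 0 = (la.zip lb).length - 1 - ((la.zip lb).reverse.takeWhile pvGapB).length := by
      rw [List.getLastD_eq_getLast?, pvMatchPos_getLast, if_neg hallr]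
      simp
    have harith : (la.zip lb).length - 1 - ((la.zip lb).reverse.takeWhile pvGapB).length + 1 = (la.zip lb).length - ((la.zip lb).reverse.takeWhile pvGapB).length := by
      omega
    rw [hh, hl, hfirst, hlast, harith]
    congr 1
    simp [List.count_eq_length_filter]
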